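-- pv_equiv track=rewrite | github.com/grassking100/deep_gene_annotator | sequence_annotation/preprocess/path_decode.py | get_safe_sites
-- ===== SOURCE A (Python) =====
-- def _get_safe_sites(sites,alt_sites=None,dist=None):
--     dist = dist or 32
--     valid_sites = set()
--     sites = sorted(list(sites))
--     valid_sites = set()
--     for index in range(len(sites)):
--         is_valid = True
--         current_site = sites[index]
--         if index < len(sites)-1:
--             next_site = sites[index+1]
--             if abs(current_site-next_site) <= dist:
--                 is_valid = False
--         if index > 0:
--             previous_site = sites[index-1]
--             if abs(current_site-previous_site) <= dist:
--                 is_valid = False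
--         if is_valid:
--             valid_sites.add(current_site)
--     if alt_sites:
--         valid_sites -= alt_sites
--     return valid_sites
--
-- def get_safe_sites(sites,alt_sites=None,dist=None):
--     valid_sites = {}
--     for id_ in sites.keys():
--         sites_ = sites[id_]
--         alt_sites_ = None
--         if alt_sites:
--             alt_sites_ = alt_sites[id_]
--         valid_sites_ = _get_safe_sites(sites_,alt_sites_,dist)
--         valid_sites[id_] = valid_sites_
--     return valid_sites
-- ===== SOURCE B (Python) =====
-- def _isolated(pts, d):
--     pts = list(pts)
--     return sorted(s for i, s in enumerate(pts)
--                   if all(j == i or abs(s - t) > d for j, t in enumerate(pts)))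
--
-- def get_safe_sites(sites, alt_sites=None, dist=None):
--     d = dist or 32
--     result = {}
--     for id_, coll in sites.items():
--         safe = set(_isolated(coll, d))
--         if alt_sites:
--             safe -= alt_sites[id_]
--         result[id_] = safe
--     return result
-- ===== Notes on version B (the rewrite author's own statement) =====
-- stated objective: alternative
-- what changed: The helper's sort-then-check-adjacent-neighbours loop is replaced by a sort-free all-pairs isolation scan (keep a site iff every other position is farther than dist); only the kept sites are sorted into the result set.
import Mathlib
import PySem

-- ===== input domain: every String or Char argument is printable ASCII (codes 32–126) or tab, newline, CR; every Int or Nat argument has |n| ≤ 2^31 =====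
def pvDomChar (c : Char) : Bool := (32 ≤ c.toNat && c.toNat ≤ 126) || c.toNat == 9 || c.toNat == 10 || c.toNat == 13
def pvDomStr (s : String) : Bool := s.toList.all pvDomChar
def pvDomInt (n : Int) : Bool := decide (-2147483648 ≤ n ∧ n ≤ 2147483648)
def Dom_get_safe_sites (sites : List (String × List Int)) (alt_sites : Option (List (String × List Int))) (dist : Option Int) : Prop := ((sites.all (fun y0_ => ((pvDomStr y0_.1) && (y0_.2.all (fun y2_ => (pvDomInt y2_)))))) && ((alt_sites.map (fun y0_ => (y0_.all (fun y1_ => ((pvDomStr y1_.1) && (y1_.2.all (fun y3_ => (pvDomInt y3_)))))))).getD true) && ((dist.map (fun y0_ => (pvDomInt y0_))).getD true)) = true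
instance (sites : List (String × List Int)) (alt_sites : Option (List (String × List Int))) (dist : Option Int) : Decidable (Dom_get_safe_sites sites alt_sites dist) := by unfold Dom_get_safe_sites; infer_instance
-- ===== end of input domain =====

-- B replaces A's sort-and-check-neighbours helper by a sort-free all-pairs isolation scan
-- (objective: alternative algorithm, similar cost). Equality proved on the stated Pre_.

-- ===== PORT A =====
-- dist = dist or 32  (None and 0 are falsy)
def pvDistDefault (dist : Option Int) : Int :=
  match dist with
  | none => 32
  | some v => if v = 0 then 32 else v

-- literal port of the helper _get_safe_sites
def pvGetSafeSitesInner (sites : List Int) (alt_sites : Option (List Int)) (dist : Option Int) : List Int :=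
  let d := pvDistDefault dist
  let s := PySem.List.sorted sites (fun x => x)
  let valid : PySem.Set Int :=
    (PySem.List.pyRange 0 (PySem.List.len s)).foldl (fun acc index =>
      let current := PySem.List.pyGetD s index 0
      let isValid : Bool :=
        if index < PySem.List.len s - 1 then
          (if |current - PySem.List.pyGetD s (index + 1) 0| ≤ d then false else true)
        else true
      let isValid : Bool :=
        if 0 < index then
          (if |current - PySem.List.pyGetD s (index - 1) 0| ≤ d then false else isValid)
        else isValid
      if isValid then PySem.Set.add acc current else acc) PySem.Set.empty
  match alt_sites with
  | none => valid
  | some al => if al = [] then valid else PySem.Set.diff valid al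

def get_safe_sites (sites : List (String × List Int)) (alt_sites : Option (List (String × List Int))) (dist : Option Int) : List (String × List Int) :=
  (PySem.List.dedup (sites.map Prod.fst)).foldl (fun acc id_ =>
    let sites_ := PySem.Dict.getD (PySem.Dict.mk sites) id_ []
    let alt_ : Option (List Int) :=
      match alt_sites with
      | none => none
      | some al => if al = [] then none else some (PySem.Dict.getD (PySem.Dict.mk al) id_ [])
    acc ++ [(id_, pvGetSafeSitesInner sites_ alt_ dist)]) []

-- ===== PORT B =====
-- port of _isolated: keep s iff every OTHER position is farther than d; sort the kept values
def pvIsolated (pts : List Int) (d : Int) : List Int :=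
  PySem.List.sorted
    (((PySem.List.enumerate pts).filter (fun p =>
        (PySem.List.enumerate pts).all (fun q => q.1 == p.1 || decide (d < |p.2 - q.2|)))).map (fun p => p.2))
    (fun x => x)

def get_safe_sites_alt (sites : List (String × List Int)) (alt_sites : Option (List (String × List Int))) (dist : Option Int) : List (String × List Int) :=
  let d := pvDistDefault dist
  (PySem.List.dedup (sites.map Prod.fst)).map (fun id_ =>
    let safe : PySem.Set Int := PySem.Set.ofList (pvIsolated (PySem.Dict.getD (PySem.Dict.mk sites) id_ []) d)
    (id_, match alt_sites with
          | none => safe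
          | some al => if al = [] then safe
                       else PySem.Set.diff safe (PySem.Dict.getD (PySem.Dict.mk al) id_ [])))

-- ===== PRECONDITION & SPEC =====
-- Pre_ excludes only inputs on which Python A raises KeyError: a non-empty alt_sites dict
-- that is missing the key of some entry of sites.
def Pre_get_safe_sites (sites : List (String × List Int)) (alt_sites : Option (List (String × List Int))) (dist : Option Int) : Prop :=
  ∀ al ∈ alt_sites.toList, al ≠ [] → ∀ p ∈ sites, p.1 ∈ al.map Prod.fst
instance (sites : List (String × List Int)) (alt_sites : Option (List (String × List Int))) (dist : Option Int) : Decidable (Pre_get_safe_sites sites alt_sites dist) := by unfold Pre_get_safe_sites; infer_instance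

def pvWitness_get_safe_sites : (List (String × List Int)) × (Option (List (String × List Int))) × Option Int :=
  ([("a", [1, 2, 100])], some [("a", [100])], none)

def Spec_get_safe_sites (sites : List (String × List Int)) (alt_sites : Option (List (String × List Int))) (dist : Option Int) (out : List (String × List Int)) : Prop := out = get_safe_sites_alt sites alt_sites dist
instance (sites : List (String × List Int)) (alt_sites : Option (List (String × List Int))) (dist : Option Int) (out : List (String × List Int)) : Decidable (Spec_get_safe_sites sites alt_sites dist out) := by unfold Spec_get_safe_sites; infer_instance

-- ===== CLAIM (what is proved, stated in full; the proofs are below) =====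
def Claim_equal_get_safe_sites : Prop := ∀ (sites : List (String × List Int)) (alt_sites : Option (List (String × List Int))) (dist : Option Int), Dom_get_safe_sites sites alt_sites dist → Pre_get_safe_sites sites alt_sites dist → Spec_get_safe_sites sites alt_sites dist (get_safe_sites sites alt_sites dist)

-- ===== LEMMAS AND PROOFS =====

-- value-level isolation predicate: x is kept iff every distinct value is far and x is unrepeated
-- (a repeated value is its own neighbour at distance 0, allowed only when d < 0)
def pvSafe (d : Int) (xs : List Int) (x : Int) : Bool :=
  decide ((∀ y ∈ xs, y ≠ x → d < |x - y|) ∧ (xs.count x = 1 ∨ d < 0))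

lemma pv_two_le_count {l : List Int} {i j : Nat} (hi : i < l.length) (hj : j < l.length)
    (hne : i ≠ j) (hx : l[i] = l[j]) : 2 ≤ l.count l[i] := by
  rw [← List.duplicate_iff_two_le_count]
  rcases Nat.lt_or_ge i j with h | h
  · exact List.duplicate_iff_exists_distinct_get.mpr ⟨⟨i, hi⟩, ⟨j, hj⟩, h, by simp, by simpa using hx⟩
  · have hlt : j < i := lt_of_le_of_ne h (Ne.symm hne)
    exact List.duplicate_iff_exists_distinct_get.mpr ⟨⟨j, hj⟩, ⟨i, hi⟩, hlt, by simpa using hx, by simp⟩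

-- index condition ⇔ value condition, for an arbitrary list
lemma pv_pall_iff (d : Int) (xs : List Int) (k : Nat) (hk : k < xs.length) :
    (∀ j, (hj : j < xs.length) → j ≠ k → d < |xs[k] - xs[j]|) ↔ pvSafe d xs xs[k] = true := by
  unfold pvSafe
  rw [decide_eq_true_iff]
  constructor
  · intro h
    refine ⟨?_, ?_⟩
    · intro y hy hne
      obtain ⟨j, hj, rfl⟩ := List.mem_iff_getElem.mp hy
      have hjk : j ≠ k := by rintro rfl; exact hne rfl
      exact h j hj hjk
    · by_cases hc : xs.count xs[k] = 1
      · exact Or.inl hc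
      · right
        have h2 : 2 ≤ xs.count xs[k] := by
          have h1 : 0 < xs.count xs[k] := List.count_pos_iff.mpr (List.getElem_mem hk)
          omega
        obtain ⟨n, m, hnm, hxn, hxm⟩ :=
          List.duplicate_iff_exists_distinct_get.mp (List.duplicate_iff_two_le_count.mpr h2)
        by_cases hn : (n : Nat) = k
        · have hmk : (m : Nat) ≠ k := by
            have hlt : (n : Nat) < (m : Nat) := hnm
            omega
          have := h m m.isLt hmk
          rw [List.get_eq_getElem] at hxm
          rw [← hxm] at this
          simpa using this
        · have := h n n.isLt hn
          rw [List.get_eq_getElem] at hxn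
          rw [← hxn] at this
          simpa using this
  · rintro ⟨h1, h2⟩ j hj hjk
    by_cases he : xs[j] = xs[k]
    · have h2c : 2 ≤ xs.count xs[k] := pv_two_le_count hk hj (fun e => hjk e.symm) he.symm
      have hd : d < 0 := by
        rcases h2 with h | h
        · omega
        · exact h
      rw [he]
      simpa using hd
    · exact h1 xs[j] (List.getElem_mem hj) he

-- on a nondecreasing list, the two-neighbour test is the all-pairs test
lemma pv_nbr_iff (d : Int) (s : List Int) (hpair : s.Pairwise (· ≤ ·)) (k : Nat) (hk : k < s.length) :
    ((∀ (h1 : k + 1 < s.length), d < |s[k] - s[k+1]|) ∧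
     (∀ (_ : 0 < k), d < |s[k] - s[k-1]'(Nat.lt_of_le_of_lt (Nat.sub_le k 1) hk)|)) ↔
    (∀ j, (hj : j < s.length) → j ≠ k → d < |s[k] - s[j]|) := by
  have mono : ∀ p q (hpq : p ≤ q) (hq : q < s.length), s[p] ≤ s[q] := by
    intro p q hpq hq
    rcases Nat.lt_or_ge p q with h | h
    · exact (List.pairwise_iff_getElem.mp hpair) p q (by omega) hq h
    · have : p = q := by omega
      subst this; exact le_refl _
  constructor
  · rintro ⟨hnext, hprev⟩ j hj hjk
    rcases Nat.lt_or_ge k j with h | h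
    · have hk1 : k + 1 < s.length := by omega
      have g1 := hnext hk1
      have m1 : s[k] ≤ s[k+1] := mono k (k+1) (by omega) hk1
      have m2 : s[k+1] ≤ s[j] := mono (k+1) j (by omega) hj
      rw [abs_of_nonpos (by omega)] at g1 ⊢
      omega
    · have hjord : j < k := by omega
      have h0 : 0 < k := by omega
      have g1 := hprev h0
      have m1 : s[k-1] ≤ s[k] := mono (k-1) k (by omega) hk
      have m2 : s[j] ≤ s[k-1]'(Nat.lt_of_le_of_lt (Nat.sub_le k 1) hk) := mono j (k-1) (by omega) (by omega)
      rw [abs_of_nonneg (by omega)] at g1 ⊢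
      omega
  · intro h
    constructor
    · intro h1; exact h (k+1) h1 (by omega)
    · intro h0; exact h (k-1) (by omega) (by omega)

lemma pv_safe_perm (d : Int) {s pts : List Int} (h : s.Perm pts) (x : Int) :
    pvSafe d s x = pvSafe d pts x := by
  unfold pvSafe
  apply decide_eq_decide.mpr
  constructor <;> rintro ⟨h1, h2⟩
  · exact ⟨fun y hy => h1 y (h.mem_iff.mpr hy), by rw [h.count_eq] at h2; exact h2⟩
  · exact ⟨fun y hy => h1 y (h.mem_iff.mp hy), by rw [h.count_eq]; exact h2⟩

-- B's helper is the sorted list of value-safe elements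
lemma pv_isolated_eq (pts : List Int) (d : Int) :
    pvIsolated pts d = PySem.List.sorted (pts.filter (pvSafe d pts)) (fun x => x) := by
  unfold pvIsolated
  congr 1
  have hcong : ∀ p ∈ PySem.List.enumerate pts,
      ((PySem.List.enumerate pts).all (fun q => q.1 == p.1 || decide (d < |p.2 - q.2|)))
        = pvSafe d pts p.2 := by
    intro p hp
    obtain ⟨k, hk, rfl⟩ := (PySem.List.mem_enumerate_iff pts 0 p).mp hp
    simp only [zero_add]
    rw [Bool.eq_iff_iff, List.all_eq_true, ← pv_pall_iff d pts k hk]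
    constructor
    · intro h j hj hjk
      have hmem := (PySem.List.mem_enumerate_iff pts 0 ((j : Int), pts[j])).mpr ⟨j, hj, by simp⟩
      have := h _ hmem
      rcases Bool.or_eq_true_iff.mp this with h' | h'
      · exact absurd (by exact_mod_cast (show ((j : Int)) = (k : Int) from beq_iff_eq.mp h')) hjk
      · exact of_decide_eq_true h'
    · intro h q hq
      obtain ⟨m, hm, rfl⟩ := (PySem.List.mem_enumerate_iff pts 0 q).mp hq
      simp only [zero_add]
      by_cases hmk : m = k
      · subst hmk; simp
      · exact Bool.or_eq_true_iff.mpr (Or.inr (decide_eq_true (h m hm hmk)))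
  rw [List.filter_congr hcong]
  have hfm := List.filter_map (f := fun p : Int × Int => p.2) (p := pvSafe d pts)
      (l := PySem.List.enumerate pts)
  rw [PySem.List.map_snd_enumerate] at hfm
  exact hfm.symm

-- the sorted kept list names A's filtered sorted list
lemma pv_sorted_filter (pts : List Int) (d : Int) :
    PySem.List.sorted (pts.filter (pvSafe d pts)) (fun x => x)
      = (PySem.List.sorted pts (fun x => x)).filter (pvSafe d (PySem.List.sorted pts (fun x => x))) := by
  have hperm : (PySem.List.sorted pts (fun x => x)).Perm pts := PySem.List.sorted_perm pts (fun x => x) false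
  have hflt : (PySem.List.sorted pts (fun x => x)).filter (pvSafe d (PySem.List.sorted pts (fun x => x)))
      = (PySem.List.sorted pts (fun x => x)).filter (pvSafe d pts) :=
    List.filter_congr (fun x _ => pv_safe_perm d hperm x)
  apply PySem.List.sorted_id_eq_of_perm_of_pairwise
  · rw [hflt]; exact hperm.filter _
  · have hp : (PySem.List.sorted pts (fun x => x)).Pairwise (· ≤ ·) := by
      simpa using PySem.List.sorted_pairwise pts (fun x => x)
    exact hp.sublist List.filter_sublist

lemma pv_diff_nil (s : PySem.Set Int) : PySem.Set.diff s [] = s := by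
  simp [PySem.Set.diff, PySem.Set.contains]

-- the nested-if validity test of A, as a pair of guarded comparisons
lemma pv_if_shape (d : Int) (C0 C1 : Prop) [Decidable C0] [Decidable C1] (a1 a2 : Int) :
    ((if C0 then (if a1 ≤ d then false else (if C1 then (if a2 ≤ d then false else true) else true))
      else (if C1 then (if a2 ≤ d then false else true) else true)) = true)
    ↔ ((C0 → d < a1) ∧ (C1 → d < a2)) := by
  split_ifs with h0 h1 h2 h3 h4 h5 <;> simp_all

-- the two per-collection computations agree
lemma pv_inner_eq (pts : List Int) (alt : Option (List Int)) (dist : Option Int) :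
    pvGetSafeSitesInner pts alt dist
      = (let safe := PySem.Set.ofList (pvIsolated pts (pvDistDefault dist))
         match alt with
         | none => safe
         | some a => if a = [] then safe else PySem.Set.diff safe a) := by
  simp only [pvGetSafeSitesInner]
  set d := pvDistDefault dist with hd
  set s := PySem.List.sorted pts (fun x => x) with hs
  have hpair : s.Pairwise (· ≤ ·) := by
    simpa using PySem.List.sorted_pairwise pts (fun x => x)
  have hV : ∀ i ∈ PySem.List.pyRange 0 (PySem.List.len s),
      ((if 0 < i then
          (if |PySem.List.pyGetD s i 0 - PySem.List.pyGetD s (i - 1) 0| ≤ d then false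
           else (if i < PySem.List.len s - 1 then
                   (if |PySem.List.pyGetD s i 0 - PySem.List.pyGetD s (i + 1) 0| ≤ d then false else true)
                 else true))
        else (if i < PySem.List.len s - 1 then
                (if |PySem.List.pyGetD s i 0 - PySem.List.pyGetD s (i + 1) 0| ≤ d then false else true)
              else true)) : Bool)
        = pvSafe d s (PySem.List.pyGetD s i 0) := by
    intro i hi
    rw [PySem.List.mem_pyRange_one] at hi
    obtain ⟨hi0, hi2⟩ := hi
    lift i to ℕ using hi0 with k
    have hk : k < s.length := by
      simp only [PySem.List.len] at hi2; exact_mod_cast hi2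
    have e0 : PySem.List.pyGetD s (k : Int) 0 = s[k] := by
      rw [PySem.List.pyGetD_natCast]; exact List.getD_eq_getElem s 0 hk
    rw [Bool.eq_iff_iff, e0, ← pv_pall_iff d s k hk, ← pv_nbr_iff d s hpair k hk,
      pv_if_shape d (0 < (k : Int)) ((k : Int) < PySem.List.len s - 1)]
    constructor
    · rintro ⟨hprev, hnext⟩
      constructor
      · intro h1
        have hg : (k : Int) < PySem.List.len s - 1 := by
          simp only [PySem.List.len]; omega
        have e1 : PySem.List.pyGetD s ((k : Int) + 1) 0 = s[k + 1] := by
          rw [show ((k : Int) + 1) = ((k + 1 : Nat) : Int) by push_cast; ring,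
            PySem.List.pyGetD_natCast]
          exact List.getD_eq_getElem s 0 h1
        have := hnext hg
        rwa [e1] at this
      · intro h0
        have hg : (0 : Int) < (k : Int) := by exact_mod_cast h0
        have e1 : PySem.List.pyGetD s ((k : Int) - 1) 0 = s[k - 1]'(by omega) := by
          rw [show ((k : Int) - 1) = ((k - 1 : Nat) : Int) by omega, PySem.List.pyGetD_natCast]
          exact List.getD_eq_getElem s 0 (by omega)
        have := hprev hg
        rwa [e1] at this
    · rintro ⟨hnext, hprev⟩
      constructor
      · intro hg
        have h0 : 0 < k := by exact_mod_cast hg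
        have e1 : PySem.List.pyGetD s ((k : Int) - 1) 0 = s[k - 1]'(by omega) := by
          rw [show ((k : Int) - 1) = ((k - 1 : Nat) : Int) by omega, PySem.List.pyGetD_natCast]
          exact List.getD_eq_getElem s 0 (by omega)
        rw [e1]
        exact hprev h0
      · intro hg
        have h1 : k + 1 < s.length := by
          simp only [PySem.List.len] at hg; omega
        have e1 : PySem.List.pyGetD s ((k : Int) + 1) 0 = s[k + 1] := by
          rw [show ((k : Int) + 1) = ((k + 1 : Nat) : Int) by push_cast; ring,
            PySem.List.pyGetD_natCast]
          exact List.getD_eq_getElem s 0 h1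
        rw [e1]
        exact hnext h1
  rw [PySem.List.foldl_if_eq_foldl_filter, ← List.foldl_map]
  rw [show (PySem.Set.empty : PySem.Set Int) = ([] : List Int) from rfl]
  rw [← PySem.Set.ofList_eq_foldl, List.filter_congr hV]
  have hmf := List.filter_map (f := fun i : Int => PySem.List.pyGetD s i 0) (p := pvSafe d s)
      (l := PySem.List.pyRange 0 (PySem.List.len s))
  rw [PySem.List.map_pyGetD_pyRange_zero] at hmf
  simp only [Function.comp_def] at hmf
  rw [← hmf, pv_isolated_eq, pv_sorted_filter, ← hs]

theorem get_safe_sites_spec : Claim_equal_get_safe_sites := by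
  intro sites alt_sites dist _ _
  unfold Spec_get_safe_sites
  cases alt_sites with
  | none =>
    simp only [get_safe_sites, get_safe_sites_alt]
    rw [PySem.List.foldl_append_singleton_eq_map]
    simp only [List.nil_append]
    apply List.map_congr_left
    intro id_ _
    rw [pv_inner_eq]
  | some al =>
    simp only [get_safe_sites, get_safe_sites_alt]
    rw [PySem.List.foldl_append_singleton_eq_map]
    simp only [List.nil_append]
    apply List.map_congr_left
    intro id_ _
    rw [pv_inner_eq]
    by_cases hal : al = []
    · simp only [hal, reduceIte]
    · simp only [hal, reduceIte]
      by_cases ha : PySem.Dict.getD (PySem.Dict.mk al) id_ ([] : List Int) = [] <;>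
        simp [ha, pv_diff_nil]
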